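-- pv_equiv track=rewrite | github.com/vfarcy/Poetic-py | tools/bespoke/bespoke_engine.py | convert_to_digits
-- ===== SOURCE A (Python) =====
-- import unicodedata
--
-- def convert_to_digits(text: str) -> str:
--     """Encode each word's letter count as digits (same rule as Poetic)."""
--     normalized = unicodedata.normalize("NFKC", text)
--     result = []
--     word_letters = 0
--     in_word = False
--
--     for ch in normalized:
--         is_letter = ch.isalpha()
--         is_apos = ch in ("'", "\u2019")
--         if is_letter or is_apos:
--             if is_letter:
--                 word_letters += 1
--             in_word = True
--         else:
--             if in_word and word_letters > 0:
--                 s = "0" if word_letters == 10 else str(word_letters)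
--                 result.append(s)
--             word_letters = 0
--             in_word = False
--
--     if in_word and word_letters > 0:
--         s = "0" if word_letters == 10 else str(word_letters)
--         result.append(s)
--
--     return "".join(result)
-- ===== SOURCE B (Python) =====
-- import unicodedata
--
-- def convert_to_digits(text: str) -> str:
--     """Encode each word's letter count as digits (same rule as Poetic)."""
--     normalized = unicodedata.normalize("NFKC", text)
--     canon = "".join(
--         "a" if c.isalpha() else "" if c in ("'", "\u2019") else " "
--         for c in normalized
--     )
--     return "".join("0" if len(w) == 10 else str(len(w)) for w in canon.split())
-- ===== Notes on version B (the rewrite author's own statement) =====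
-- stated objective: simpler
-- what changed: Replaces A's per-character in_word/word_letters state machine (with its duplicated end-of-loop flush) by two staged passes: map each char to a canonical form ('a' for letters, dropped apostrophes, ' ' for separators), then str.split() the canonical string and emit each word's length.
import Mathlib
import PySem

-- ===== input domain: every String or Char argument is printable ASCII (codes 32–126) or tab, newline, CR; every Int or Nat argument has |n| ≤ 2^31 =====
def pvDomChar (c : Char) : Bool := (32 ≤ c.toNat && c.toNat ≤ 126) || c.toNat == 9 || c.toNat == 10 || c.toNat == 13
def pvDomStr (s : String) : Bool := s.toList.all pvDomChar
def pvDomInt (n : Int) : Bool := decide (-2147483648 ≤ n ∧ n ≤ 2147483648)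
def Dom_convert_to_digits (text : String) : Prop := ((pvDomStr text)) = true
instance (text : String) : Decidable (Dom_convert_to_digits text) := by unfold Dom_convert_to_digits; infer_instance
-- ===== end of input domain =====

-- B replaces A's per-character in_word/word_letters state machine by two staged passes:
-- canonicalize each char ('a'/dropped/' '), then split() and emit word lengths. Objective: simpler.
-- NFKC normalization is the identity on the printable-ASCII domain, so both ports transliterate it as such.

-- ===== PORT A =====
-- the for-loop of A, state (result, word_letters, in_word); the [] case is the
-- post-loop flush 'if in_word and word_letters > 0: result.append(...)'
def convertA_loop : List Char → List String → Nat → Bool → List String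
  | [], result, word_letters, in_word =>
      if in_word && decide (word_letters > 0) then
        result ++ [if word_letters == 10 then "0" else PySem.Int.toStr (word_letters : Int)]
      else result
  | ch :: rest, result, word_letters, in_word =>
      let is_letter := PySem.Chars.isalpha ch
      let is_apos := ch == '\'' || ch == '’'
      if is_letter || is_apos then
        convertA_loop rest result (if is_letter then word_letters + 1 else word_letters) true
      else
        convertA_loop rest
          (if in_word && decide (word_letters > 0) then
            result ++ [if word_letters == 10 then "0" else PySem.Int.toStr (word_letters : Int)]
          else result)
          0 false

def convert_to_digits (text : String) : String :=
  PySem.Str.join "" (convertA_loop text.toList [] 0 false)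

-- ===== PORT B =====
-- canon = "".join("a" if c.isalpha() else "" if c in ("'", "’") else " " for c in normalized)
def pvCanon (cs : List Char) : List Char :=
  cs.flatMap (fun c =>
    if PySem.Chars.isalpha c then ['a']
    else if c == '\'' || c == '’' then []
    else [' '])

-- "".join("0" if len(w) == 10 else str(len(w)) for w in canon.split())
def convert_to_digits_alt (text : String) : String :=
  PySem.Str.join ""
    ((PySem.Chars.split₀ (pvCanon text.toList)).map
      (fun w => if w.length == 10 then "0" else PySem.Int.toStr (w.length : Int)))

-- ===== PRECONDITION & SPEC =====
def Spec_convert_to_digits (text : String) (out : String) : Prop := out = convert_to_digits_alt text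
instance (text : String) (out : String) : Decidable (Spec_convert_to_digits text out) := by unfold Spec_convert_to_digits; infer_instance

-- ===== CLAIM (what is proved, stated in full; the proofs are below) =====
def Claim_equal_convert_to_digits : Prop := ∀ (text : String), Dom_convert_to_digits text → Spec_convert_to_digits text (convert_to_digits text)

-- ===== LEMMAS AND PROOFS =====

-- digit string for a word of n letters
def pvEnc (w : List Char) : String :=
  if w.length == 10 then "0" else PySem.Int.toStr (w.length : Int)

theorem convertA_loop_acc (cs : List Char) :
    ∀ (acc : List String) (wl : Nat) (inw : Bool),
      convertA_loop cs acc wl inw = acc ++ convertA_loop cs [] wl inw := by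
  induction cs with
  | nil =>
      intro acc wl inw
      simp only [convertA_loop]
      split <;> simp
  | cons c cs ih =>
      intro acc wl inw
      simp only [convertA_loop]
      split
      · exact ih ..
      · rw [ih, ih]
        split_ifs <;> (conv_rhs => rw [ih]) <;> simp

theorem split₀_go_acc (cs : List Char) :
    ∀ (cur : List Char) (acc : List (List Char)),
      PySem.Chars.split₀.go cs cur acc = acc.reverse ++ PySem.Chars.split₀.go cs cur [] := by
  induction cs with
  | nil =>
      intro cur acc
      simp only [PySem.Chars.split₀.go]
      split <;> simp
  | cons c cs ih =>
      intro cur acc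
      simp only [PySem.Chars.split₀.go]
      split
      · split
        · exact ih ..
        · rw [ih, ih [] [cur.reverse]]; simp
      · exact ih ..

-- the central invariant: A's loop in state (wl, inw) computes the encodings of
-- split₀ of the canonical remainder with wl pending letters in split₀'s current word
theorem pvCanon_cons (c : Char) (cs : List Char) :
    pvCanon (c :: cs) =
      (if PySem.Chars.isalpha c then ['a']
       else if c == '\'' || c == '\u2019' then [] else [' ']) ++ pvCanon cs := by
  simp [pvCanon]

theorem convertA_eq_split (cs : List Char) :
    ∀ (wl : Nat) (inw : Bool), (inw = false → wl = 0) →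
      convertA_loop cs [] wl inw =
        (PySem.Chars.split₀.go (pvCanon cs) (List.replicate wl 'a') []).map pvEnc := by
  induction cs with
  | nil =>
      intro wl inw hinw
      simp only [convertA_loop, pvCanon, List.flatMap_nil, PySem.Chars.split₀.go]
      by_cases hwl : wl = 0
      · subst hwl; cases inw <;> simp
      · have hinw' : inw = true := by
          cases inw
          · exact absurd (hinw rfl) hwl
          · rfl
        subst hinw'
        simp [pvEnc, hwl, Nat.pos_of_ne_zero hwl]
  | cons c cs ih =>
      intro wl inw hinw
      rw [pvCanon_cons]
      simp only [convertA_loop]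
      by_cases ha : PySem.Chars.isalpha c = true
      · -- letter: canonical 'a', split₀ extends the current word
        simp only [ha, Bool.true_or, if_true, List.singleton_append,
          PySem.Chars.split₀.go]
        have hsp : PySem.Chars.isspace 'a' = false := by decide
        rw [hsp]
        simp only [Bool.false_eq_true, if_false, ← List.replicate_succ]
        exact ih (wl + 1) true (by simp)
      · have ha' : PySem.Chars.isalpha c = false := by simpa using ha
        by_cases hap : (c == '\'' || c == '\u2019') = true
        · -- apostrophe: dropped from canon, A keeps wl and sets in_word
          simp only [ha', hap, Bool.false_eq_true, if_false, Bool.false_or, if_true,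
            List.nil_append]
          exact ih wl true (by simp)
        · -- separator: canonical ' ', both flush
          simp only [ha', hap, Bool.false_eq_true, if_false, Bool.false_or,
            List.singleton_append, PySem.Chars.split₀.go]
          have hsp : PySem.Chars.isspace ' ' = true := by decide
          rw [hsp]
          simp only [if_true]
          rw [convertA_loop_acc, ih 0 false (fun _ => rfl)]
          by_cases hwl : wl = 0
          · subst hwl; cases inw <;> simp
          · have hinw' : inw = true := by
              cases inw
              · exact absurd (hinw rfl) hwl
              · rfl
            subst hinw'
            have h1 : (true && decide (wl > 0)) = true := by
              simp [Nat.pos_of_ne_zero hwl]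
            have h2 : (List.replicate wl 'a').isEmpty = false := by simp [hwl]
            simp only [h1, h2, if_true, Bool.false_eq_true, if_false]
            rw [split₀_go_acc (pvCanon cs) [] [(List.replicate wl 'a').reverse]]
            simp [pvEnc]

-- ===== VERDICT (by name: the statement is the Claim_ definition above) =====
theorem convert_to_digits_spec : Claim_equal_convert_to_digits := by
  intro text _
  unfold Spec_convert_to_digits convert_to_digits convert_to_digits_alt
  rw [convertA_eq_split text.toList 0 false (fun _ => rfl)]
  rfl
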